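-- pv_equiv track=rewrite | github.com/emikysa/housing-affordability-explorer | loader/archive/transform_cost_elements.py | normalize_sort_orders
-- ===== SOURCE A (Python) =====
-- from collections import defaultdict
-- from typing import Dict, List, Set, Tuple
--
-- def normalize_sort_orders(rows: List[Dict]) -> List[Dict]:
--     """Normalize sort_order within each sibling group."""
--     by_parent = defaultdict(list)
--     for row in rows:
--         by_parent[row.get('parent_id', '')].append(row)
--
--     for parent_id, siblings in by_parent.items():
--         siblings.sort(key=lambda r: (int(r.get('sort_order') or 0), r.get('short_name', '')))
--         for i, row in enumerate(siblings, 1):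
--             row['sort_order'] = str(i)
--
--     return rows
-- ===== SOURCE B (Python) =====
-- def normalize_sort_orders(rows):
--     """Normalize sort_order within each sibling group (mutates the row dicts in place)."""
--     order = sorted(rows, key=lambda r: (int(r.get('sort_order') or 0), r.get('short_name', '')))
--     counters = {}
--     for row in order:
--         parent = row.get('parent_id', '')
--         count = counters.get(parent, 0) + 1
--         counters[parent] = count
--         row['sort_order'] = str(count)
--     return rows
-- ===== Notes on version B (the rewrite author's own statement) =====
-- stated objective: simpler
-- what changed: A groups rows into a defaultdict of sibling lists and sorts each group separately before enumerating ranks; B does one global stable sort of all rows by the (sort_order, short_name) key and then a single pass with a per-parent counter dict, relying on sort stability to give each sibling group the same relative order.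
import Mathlib
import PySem

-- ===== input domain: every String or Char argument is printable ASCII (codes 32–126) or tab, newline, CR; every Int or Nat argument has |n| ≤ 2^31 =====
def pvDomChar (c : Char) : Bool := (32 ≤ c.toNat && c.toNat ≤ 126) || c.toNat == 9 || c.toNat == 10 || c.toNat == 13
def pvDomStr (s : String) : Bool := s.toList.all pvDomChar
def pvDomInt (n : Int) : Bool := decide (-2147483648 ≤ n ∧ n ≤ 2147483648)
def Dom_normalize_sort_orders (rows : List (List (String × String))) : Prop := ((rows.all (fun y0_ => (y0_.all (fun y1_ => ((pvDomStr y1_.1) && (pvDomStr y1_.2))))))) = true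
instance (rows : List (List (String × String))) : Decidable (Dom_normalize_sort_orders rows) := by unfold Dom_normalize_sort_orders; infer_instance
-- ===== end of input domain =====

-- B replaces A's group-by-parent + per-group sorts with ONE global stable sort and a single
-- counter pass (objective: simpler); both Pythons mutate the row dicts in place and return the
-- original list — the theorems here are about the returned value (rows in their original order
-- with the rewritten 'sort_order' fields).

-- ===== PORT A =====
-- shared row accessors (both Pythons use the identical expressions)
def pvGet (r : List (String × String)) (k dflt : String) : String :=
  ((PySem.Dict.mk r).get? k).getD dflt

-- int(r.get('sort_order') or 0): missing key or empty string is falsy → 0; Pre_ excludes the raising parses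
def pvSortVal (r : List (String × String)) : Int :=
  let s := pvGet r "sort_order" ""
  if s = "" then 0 else (PySem.Int.ofStr? s).getD 0

-- row['sort_order'] = v  (dict assignment: overwrite in place, else append)
def pvSetSort (r : List (String × String)) (v : String) : List (String × String) :=
  ((PySem.Dict.mk r).insert "sort_order" v).items

-- rows are tagged with their index (Python object identity → tag); the in-place mutations are
-- modelled as a tag → new-sort_order map applied to the original list at the end.
def normalize_sort_orders (rows : List (List (String × String))) : List (List (String × String)) :=
  let dec := PySem.List.enumerate rows 0
  let by_parent : PySem.Dict String (List (Int × List (String × String))) :=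
    dec.foldl (fun d q => d.modify (pvGet q.2 "parent_id" "") [] (fun g => g ++ [q])) PySem.Dict.empty
  let ranks : PySem.Dict Int String :=
    by_parent.items.foldl
      (fun rk pr =>
        let sibs := PySem.List.sorted2 pr.2 (fun q => pvSortVal q.2) (fun q => pvGet q.2 "short_name" "")
        (PySem.List.enumerate sibs 1).foldl (fun rk2 iq => rk2.insert iq.2.1 (PySem.Int.toStr iq.1)) rk)
      PySem.Dict.empty
  dec.map (fun q => pvSetSort q.2 (ranks.getD q.1 ""))

-- ===== PORT B =====
def normalize_sort_orders_alt (rows : List (List (String × String))) : List (List (String × String)) :=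
  let dec := PySem.List.enumerate rows 0
  let order := PySem.List.sorted2 dec (fun q => pvSortVal q.2) (fun q => pvGet q.2 "short_name" "")
  let st := order.foldl
    (fun (st : PySem.Dict String Int × PySem.Dict Int String) q =>
      let p := pvGet q.2 "parent_id" ""
      let c := st.1.getD p 0 + 1
      (st.1.insert p c, st.2.insert q.1 (PySem.Int.toStr c)))
    (PySem.Dict.empty, PySem.Dict.empty)
  dec.map (fun q => pvSetSort q.2 (st.2.getD q.1 ""))

-- ===== PRECONDITION & SPEC =====
-- Pre_ excludes exactly the inputs on which the Python raises ValueError: a row whose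
-- 'sort_order' value is a non-empty string that int() cannot parse.
def Pre_normalize_sort_orders (rows : List (List (String × String))) : Prop :=
  ∀ r ∈ rows, pvGet r "sort_order" "" = "" ∨ (PySem.Int.ofStr? (pvGet r "sort_order" "")).isSome = true
instance (rows : List (List (String × String))) : Decidable (Pre_normalize_sort_orders rows) := by
  unfold Pre_normalize_sort_orders; infer_instance

def pvWitness_normalize_sort_orders : (List (List (String × String))) :=
  [[("parent_id", "a"), ("sort_order", "2"), ("short_name", "x")],
   [("parent_id", "a"), ("short_name", "y")],
   [("parent_id", "b"), ("sort_order", " 7 ")]]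

def Spec_normalize_sort_orders (rows : List (List (String × String))) (out : List (List (String × String))) : Prop := out = normalize_sort_orders_alt rows
instance (rows : List (List (String × String))) (out : List (List (String × String))) : Decidable (Spec_normalize_sort_orders rows out) := by unfold Spec_normalize_sort_orders; infer_instance

-- ===== CLAIM (what is proved, stated in full; the proofs are below) =====
def Claim_equal_normalize_sort_orders : Prop := ∀ (rows : List (List (String × String))), Dom_normalize_sort_orders rows → Pre_normalize_sort_orders rows → Spec_normalize_sort_orders rows (normalize_sort_orders rows)

-- ===== LEMMAS AND PROOFS =====

def pvBefore (a b : Int × List (String × String)) : Bool :=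
  decide (pvSortVal a.2 < pvSortVal b.2) ||
    (!decide (pvSortVal b.2 < pvSortVal a.2) && decide (pvGet a.2 "short_name" "" < pvGet b.2 "short_name" ""))

theorem pv_sorted2_eq (xs : List (Int × List (String × String))) :
    PySem.List.sorted2 xs (fun q => pvSortVal q.2) (fun q => pvGet q.2 "short_name" "") =
      xs.foldl (fun a x => PySem.List.insertBy pvBefore x a) [] := rfl

theorem pv_before_iff (a b : Int × List (String × String)) :
    pvBefore a b = true ↔
      (pvSortVal a.2 < pvSortVal b.2 ∨
        (pvSortVal a.2 = pvSortVal b.2 ∧ pvGet a.2 "short_name" "" < pvGet b.2 "short_name" "")) := by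
  simp only [pvBefore, Bool.or_eq_true, Bool.and_eq_true, Bool.not_eq_true', decide_eq_true_eq,
    decide_eq_false_iff_not]
  constructor
  · rintro (h | ⟨h1, h2⟩)
    · exact Or.inl h
    · by_cases h3 : pvSortVal a.2 < pvSortVal b.2
      · exact Or.inl h3
      · exact Or.inr ⟨by omega, h2⟩
  · rintro (h | ⟨h1, h2⟩)
    · exact Or.inl h
    · exact Or.inr ⟨by omega, h2⟩

theorem pv_before_false_iff (a b : Int × List (String × String)) :
    pvBefore a b = false ↔
      (pvSortVal b.2 < pvSortVal a.2 ∨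
        (pvSortVal a.2 = pvSortVal b.2 ∧ ¬ pvGet a.2 "short_name" "" < pvGet b.2 "short_name" "")) := by
  rw [← Bool.not_eq_true, pv_before_iff]
  push Not
  constructor
  · rintro ⟨h1, h2⟩
    by_cases h3 : pvSortVal b.2 < pvSortVal a.2
    · exact Or.inl h3
    · exact Or.inr ⟨by omega, h2 (by omega)⟩
  · rintro (h | ⟨h1, h2⟩)
    · exact ⟨by omega, fun hh => absurd hh (by omega)⟩
    · exact ⟨by omega, fun _ => h2⟩

theorem pv_before_asymm (a b : Int × List (String × String)) :
    pvBefore a b = true → pvBefore b a = false := by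
  rw [pv_before_iff, pv_before_false_iff]
  rintro (h | ⟨h1, h2⟩)
  · exact Or.inl h
  · exact Or.inr ⟨h1.symm, fun hh => absurd h2 (not_lt_of_gt hh)⟩

theorem pv_before_trans (a b c : Int × List (String × String)) :
    pvBefore a b = true → pvBefore c b = false → pvBefore a c = true := by
  rw [pv_before_iff, pv_before_false_iff, pv_before_iff]
  rintro (h | ⟨h1, h2⟩) (h' | ⟨h1', h2'⟩)
  · exact Or.inl (by omega)
  · exact Or.inl (by omega)
  · exact Or.inl (by omega)
  · exact Or.inr ⟨by omega, lt_of_lt_of_le h2 (not_lt.mp h2')⟩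

theorem pv_insertBy_nil (x : Int × List (String × String)) :
    PySem.List.insertBy pvBefore x [] = [x] := by simp [PySem.List.insertBy]

theorem pv_insertBy_cons (x y : Int × List (String × String)) (ys : List (Int × List (String × String))) :
    PySem.List.insertBy pvBefore x (y :: ys) =
      if pvBefore x y then x :: y :: ys else y :: PySem.List.insertBy pvBefore x ys := by
  simp [PySem.List.insertBy]

theorem pv_insertBy_all (x : Int × List (String × String)) (m : List (Int × List (String × String)))
    (h : ∀ y ∈ m, pvBefore x y = true) : PySem.List.insertBy pvBefore x m = x :: m := by
  cases m with
  | nil => exact pv_insertBy_nil x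
  | cons y ys => rw [pv_insertBy_cons, if_pos (h y (List.mem_cons_self))]

theorem pv_noInv_insertBy (x : Int × List (String × String)) (l : List (Int × List (String × String)))
    (h : l.Pairwise (fun a b => pvBefore b a = false)) :
    (PySem.List.insertBy pvBefore x l).Pairwise (fun a b => pvBefore b a = false) := by
  induction l with
  | nil => simp [pv_insertBy_nil]
  | cons y ys ih =>
    rcases List.pairwise_cons.mp h with ⟨hy, hys⟩
    rw [pv_insertBy_cons]
    by_cases hxy : pvBefore x y = true
    · rw [if_pos hxy]
      refine List.pairwise_cons.mpr ⟨?_, h⟩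
      intro b hb
      rcases List.mem_cons.mp hb with rfl | hb
      · exact pv_before_asymm x b hxy
      · exact pv_before_asymm x b (pv_before_trans x y b hxy (hy b hb))
    · rw [if_neg hxy]
      refine List.pairwise_cons.mpr ⟨?_, ih hys⟩
      intro b hb
      rcases (PySem.List.insertBy_mem_iff _ _ _ _).mp hb with rfl | hb
      · exact Bool.eq_false_iff.mpr hxy
      · exact hy b hb

theorem pv_filter_insertBy (f : Int × List (String × String) → Bool) (x : Int × List (String × String))
    (l : List (Int × List (String × String))) (h : l.Pairwise (fun a b => pvBefore b a = false)) :
    (PySem.List.insertBy pvBefore x l).filter f =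
      if f x then PySem.List.insertBy pvBefore x (l.filter f) else l.filter f := by
  induction l with
  | nil =>
    rw [pv_insertBy_nil]
    by_cases hf : f x
    · simp [hf, pv_insertBy_nil]
    · simp [hf]
  | cons y ys ih =>
    rcases List.pairwise_cons.mp h with ⟨hy, hys⟩
    rw [pv_insertBy_cons]
    by_cases hxy : pvBefore x y = true
    · rw [if_pos hxy]
      by_cases hf : f x
      · rw [if_pos hf]
        by_cases hfy : f y
        · rw [List.filter_cons_of_pos hfy, pv_insertBy_cons, if_pos hxy]
          simp [List.filter_cons, hf, hfy]
        · have hfy' : f y = false := Bool.eq_false_iff.mpr hfy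
          have hall : ∀ b ∈ ys.filter f, pvBefore x b = true := by
            intro b hb
            exact pv_before_trans x y b hxy (hy b (List.mem_of_mem_filter hb))
          rw [List.filter_cons_of_pos hf, List.filter_cons_of_neg (by simp [hfy']),
            pv_insertBy_all x _ hall]
      · simp [List.filter_cons, hf]
    · rw [if_neg hxy]
      by_cases hf : f x
      · rw [if_pos hf]
        by_cases hfy : f y
        · rw [List.filter_cons_of_pos hfy, ih hys, if_pos hf, List.filter_cons_of_pos hfy,
            pv_insertBy_cons, if_neg hxy]
        · have hfy' : f y = false := Bool.eq_false_iff.mpr hfy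
          rw [List.filter_cons_of_neg (by simp [hfy']), List.filter_cons_of_neg (by simp [hfy']),
            ih hys, if_pos hf]
      · rw [if_neg hf]
        simp only [List.filter_cons]
        rw [ih hys, if_neg hf]

theorem pv_filter_sorted (f : Int × List (String × String) → Bool) (xs : List (Int × List (String × String))) :
    ∀ acc, acc.Pairwise (fun a b => pvBefore b a = false) →
      (xs.foldl (fun a x => PySem.List.insertBy pvBefore x a) acc).filter f =
        (xs.filter f).foldl (fun a x => PySem.List.insertBy pvBefore x a) (acc.filter f) := by
  induction xs with
  | nil => intro acc _; simp
  | cons x t ih =>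
    intro acc h
    simp only [List.foldl_cons, List.filter_cons]
    rw [ih _ (pv_noInv_insertBy x acc h), pv_filter_insertBy f x acc h]
    by_cases hf : f x
    · simp [hf]
    · simp [hf]

def pvInner (s : Int) (sg : List (Int × List (String × String))) (rk : PySem.Dict Int String) :
    PySem.Dict Int String :=
  (PySem.List.enumerate sg s).foldl (fun rk2 iq => rk2.insert iq.2.1 (PySem.Int.toStr iq.1)) rk

theorem pvInner_get_notmem (s : Int) (sg : List (Int × List (String × String))) (rk : PySem.Dict Int String)
    (i : Int) (hi : i ∉ sg.map (·.1)) : (pvInner s sg rk).get? i = rk.get? i := by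
  induction sg generalizing s rk with
  | nil => rfl
  | cons x t ih =>
    simp only [List.map_cons, List.mem_cons, not_or] at hi
    show (pvInner (s+1) t (rk.insert x.1 (PySem.Int.toStr s))).get? i = rk.get? i
    rw [ih (s+1) _ hi.2, PySem.Dict.get?_insert_of_ne _ _ hi.1]

theorem pvInner_get (s : Int) (sg : List (Int × List (String × String))) (rk : PySem.Dict Int String)
    (hnd : (sg.map (·.1)).Nodup) (j : Nat) (hj : j < sg.length) :
    (pvInner s sg rk).get? (sg[j].1) = some (PySem.Int.toStr (s + j)) := by
  induction sg generalizing s rk j with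
  | nil => simp at hj
  | cons x t ih =>
    simp only [List.map_cons, List.nodup_cons] at hnd
    cases j with
    | zero =>
      show (pvInner (s+1) t (rk.insert x.1 (PySem.Int.toStr s))).get? x.1 = _
      rw [pvInner_get_notmem _ _ _ _ hnd.1, PySem.Dict.get?_insert_self]
      norm_num
    | succ j =>
      have hj' : j < t.length := by simpa using hj
      show (pvInner (s+1) t (rk.insert x.1 (PySem.Int.toStr s))).get? ((t[j]'hj').1) = _
      rw [ih (s+1) _ hnd.2 j hj']
      have hcast : s + 1 + (j : Int) = s + ((j + 1 : Nat) : Int) := by push_cast; ring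
      rw [hcast]

def pvOuter (its : List (String × List (Int × List (String × String)))) (rk : PySem.Dict Int String) :
    PySem.Dict Int String :=
  its.foldl
    (fun rk pr =>
      pvInner 1 (PySem.List.sorted2 pr.2 (fun q => pvSortVal q.2) (fun q => pvGet q.2 "short_name" "")) rk)
    rk

theorem pv_mem_sorted2 (G : List (Int × List (String × String))) (q : Int × List (String × String)) :
    q ∈ PySem.List.sorted2 G (fun q => pvSortVal q.2) (fun q => pvGet q.2 "short_name" "") ↔ q ∈ G :=
  (PySem.List.sorted2_perm G _ _ _).mem_iff

theorem pv_map_sorted2_perm (G : List (Int × List (String × String))) :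
    ((PySem.List.sorted2 G (fun q => pvSortVal q.2) (fun q => pvGet q.2 "short_name" "")).map (·.1)).Perm
      (G.map (·.1)) :=
  (PySem.List.sorted2_perm G _ _ _).map _

theorem pvOuter_get_notmem (its : List (String × List (Int × List (String × String))))
    (rk : PySem.Dict Int String) (i : Int) (hi : ∀ pr ∈ its, i ∉ pr.2.map (·.1)) :
    (pvOuter its rk).get? i = rk.get? i := by
  induction its generalizing rk with
  | nil => rfl
  | cons pr t ih =>
    show (pvOuter t (pvInner 1 _ rk)).get? i = rk.get? i
    rw [ih _ (fun pr' h => hi pr' (List.mem_cons_of_mem _ h)),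
      pvInner_get_notmem _ _ _ _ (fun h => hi pr List.mem_cons_self
        ((pv_map_sorted2_perm pr.2).mem_iff.mp h))]

theorem pvOuter_get (its : List (String × List (Int × List (String × String))))
    (rk : PySem.Dict Int String) (p : String) (G : List (Int × List (String × String)))
    (hmem : (p, G) ∈ its)
    (hfst : ∀ pr ∈ its, pr.1 = p → pr.2 = G)
    (hother : ∀ pr ∈ its, pr.1 ≠ p → ∀ q ∈ G, q.1 ∉ pr.2.map (·.1))
    (hnd : (G.map (·.1)).Nodup)
    (j : Nat)
    (hj : j < (PySem.List.sorted2 G (fun q => pvSortVal q.2) (fun q => pvGet q.2 "short_name" "")).length) :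
    (pvOuter its rk).get?
        ((PySem.List.sorted2 G (fun q => pvSortVal q.2) (fun q => pvGet q.2 "short_name" ""))[j].1)
      = some (PySem.Int.toStr (1 + j)) := by
  induction its generalizing rk with
  | nil => simp at hmem
  | cons pr t ih =>
    by_cases hmem' : (p, G) ∈ t
    · exact ih _ hmem' (fun pr' h hp => hfst pr' (List.mem_cons_of_mem _ h) hp)
        (fun pr' h hp => hother pr' (List.mem_cons_of_mem _ h) hp)
    · -- head must be (p, G); tail entries have fst ≠ p
      have hhd : pr = (p, G) := by
        rcases List.mem_cons.mp hmem with h | h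
        · exact h.symm
        · exact absurd h hmem'
      subst hhd
      have htl : ∀ pr' ∈ t, pr'.1 ≠ p := by
        intro pr' h hp
        have := hfst pr' (List.mem_cons_of_mem _ h) hp
        apply hmem'
        have : pr' = (p, G) := by
          cases pr'; simp_all
        rw [← this]; exact h
      show (pvOuter t (pvInner 1 _ rk)).get? _ = _
      rw [pvOuter_get_notmem]
      · exact pvInner_get _ _ _ (((pv_map_sorted2_perm G).nodup_iff).mpr hnd) j hj
      · intro pr' h
        have hq : (PySem.List.sorted2 G (fun q => pvSortVal q.2) (fun q => pvGet q.2 "short_name" ""))[j] ∈ G :=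
          (pv_mem_sorted2 G _).mp (List.getElem_mem hj)
        exact hother pr' (List.mem_cons_of_mem _ h) (htl pr' h) _ hq

def pvStep (st : PySem.Dict String Int × PySem.Dict Int String) (q : Int × List (String × String)) :
    PySem.Dict String Int × PySem.Dict Int String :=
  let p := pvGet q.2 "parent_id" ""
  let c := st.1.getD p 0 + 1
  (st.1.insert p c, st.2.insert q.1 (PySem.Int.toStr c))

theorem pvB_counter (l : List (Int × List (String × String))) (p : String) :
    (l.foldl pvStep (PySem.Dict.empty, PySem.Dict.empty)).1.getD p 0 =
      (l.countP (fun q => pvGet q.2 "parent_id" "" == p) : Int) := by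
  induction l using List.reverseRecOn with
  | nil => simp [PySem.Dict.getD_empty]
  | append_singleton l q ih =>
    rw [List.foldl_append]
    simp only [List.foldl_cons, List.foldl_nil]
    show ((l.foldl pvStep (PySem.Dict.empty, PySem.Dict.empty)).1.insert (pvGet q.2 "parent_id" "") _).getD p 0 = _
    rw [PySem.Dict.getD_insert, List.countP_append]
    by_cases hp : p = pvGet q.2 "parent_id" ""
    · have hbe : (pvGet q.2 "parent_id" "" == p) = true := by rw [← hp]; exact beq_self_eq_true p
      have h1 : List.countP (fun q => pvGet q.2 "parent_id" "" == p) [q] = 1 := by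
        simp [List.countP_cons, hbe]
      rw [if_pos hp, ← hp, ih, h1]
      push_cast
      ring
    · rw [if_neg hp, ih]
      have hbe : (pvGet q.2 "parent_id" "" == p) = false := beq_eq_false_iff_ne.mpr (Ne.symm hp)
      have h0 : List.countP (fun q => pvGet q.2 "parent_id" "" == p) [q] = 0 := by
        simp [List.countP_cons, hbe]
      rw [h0, Nat.add_zero]

theorem pvB_ranks (l : List (Int × List (String × String))) (hnd : (l.map (·.1)).Nodup) (p : String)
    (j : Nat) (hj : j < (l.filter (fun q => pvGet q.2 "parent_id" "" == p)).length) :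
    (l.foldl pvStep (PySem.Dict.empty, PySem.Dict.empty)).2.get?
        ((l.filter (fun q => pvGet q.2 "parent_id" "" == p))[j].1)
      = some (PySem.Int.toStr ((j : Int) + 1)) := by
  induction l using List.reverseRecOn generalizing j with
  | nil => simp at hj
  | append_singleton l q ih =>
    have hnd' : (l.map (·.1)).Nodup := by
      simp only [List.map_append, List.nodup_append] at hnd
      exact hnd.1
    have hqnot : q.1 ∉ l.map (·.1) := by
      simp only [List.map_append, List.nodup_append] at hnd
      intro h
      exact hnd.2.2 q.1 h q.1 (by simp) rfl
    have htagne : ∀ x ∈ l.filter (fun q => pvGet q.2 "parent_id" "" == p), x.1 ≠ q.1 := by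
      intro x hx he
      exact hqnot (he ▸ List.mem_map_of_mem (List.mem_of_mem_filter hx))
    rw [List.foldl_append]
    simp only [List.foldl_cons, List.foldl_nil]
    by_cases hp : pvGet q.2 "parent_id" "" == p
    · have hpe : pvGet q.2 "parent_id" "" = p := eq_of_beq hp
      have hfil : (l ++ [q]).filter (fun q => pvGet q.2 "parent_id" "" == p) =
          l.filter (fun q => pvGet q.2 "parent_id" "" == p) ++ [q] := by
        rw [List.filter_append]
        simp [List.filter_cons, hp]
      simp only [hfil] at hj ⊢
      rcases Nat.lt_succ_iff_lt_or_eq.mp (by simpa using hj) with hj' | hj'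
      · have hidx : (l.filter (fun q => pvGet q.2 "parent_id" "" == p) ++ [q])[j] =
            (l.filter (fun q => pvGet q.2 "parent_id" "" == p))[j]'hj' := by
          rw [List.getElem_append_left hj']
        rw [hidx]
        show ((l.foldl pvStep (PySem.Dict.empty, PySem.Dict.empty)).2.insert q.1 _).get? _ = _
        rw [PySem.Dict.get?_insert_of_ne _ _ (htagne _ (List.getElem_mem hj'))]
        exact ih hnd' j hj'
      · subst hj'
        have hidx : (l.filter (fun q => pvGet q.2 "parent_id" "" == p) ++
            [q])[(l.filter (fun q => pvGet q.2 "parent_id" "" == p)).length] = q := by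
          simp
        rw [hidx]
        show ((l.foldl pvStep (PySem.Dict.empty, PySem.Dict.empty)).2.insert q.1
          (PySem.Int.toStr ((l.foldl pvStep (PySem.Dict.empty, PySem.Dict.empty)).1.getD
            (pvGet q.2 "parent_id" "") 0 + 1))).get? q.1 = _
        rw [PySem.Dict.get?_insert_self, hpe, pvB_counter l p]
        congr 2
        rw [List.countP_eq_length_filter]
    · have hbe : (pvGet q.2 "parent_id" "" == p) = false := Bool.eq_false_iff.mpr hp
      have hfil : (l ++ [q]).filter (fun q => pvGet q.2 "parent_id" "" == p) =
          l.filter (fun q => pvGet q.2 "parent_id" "" == p) := by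
        rw [List.filter_append]
        simp [List.filter_cons, hbe]
      simp only [hfil] at hj ⊢
      show ((l.foldl pvStep (PySem.Dict.empty, PySem.Dict.empty)).2.insert q.1 _).get? _ = _
      rw [PySem.Dict.get?_insert_of_ne _ _ (htagne _ (List.getElem_mem hj))]
      exact ih hnd' j hj

theorem pv_tags_nodup (rows : List (List (String × String))) :
    ((PySem.List.enumerate rows 0).map (·.1)).Nodup := by
  have h := PySem.List.pairwise_lt_enumerate rows 0
  have h2 : ((PySem.List.enumerate rows 0).map (·.1)).Pairwise (· < ·) :=
    List.pairwise_map.mpr h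
  exact List.Pairwise.imp ne_of_lt h2

theorem pv_tag_inj (rows : List (List (String × String))) (x y : Int × List (String × String))
    (hx : x ∈ PySem.List.enumerate rows 0) (hy : y ∈ PySem.List.enumerate rows 0)
    (h : x.1 = y.1) : x = y := by
  have := pv_tags_nodup rows
  exact List.inj_on_of_nodup_map this hx hy h

def pvGroups (rows : List (List (String × String))) :
    PySem.Dict String (List (Int × List (String × String))) :=
  (PySem.List.enumerate rows 0).foldl
    (fun d q => d.modify (pvGet q.2 "parent_id" "") [] (fun g => g ++ [q])) PySem.Dict.empty

theorem pvGroups_getD (rows : List (List (String × String))) (c : String) :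
    (pvGroups rows).getD c [] =
      (PySem.List.enumerate rows 0).filter (fun q => pvGet q.2 "parent_id" "" == c) := by
  unfold pvGroups
  have hfold : ((PySem.List.enumerate rows 0).foldl
      (fun d q => d.modify (pvGet q.2 "parent_id" "") [] (fun g => g ++ [q])) PySem.Dict.empty) =
      (((PySem.List.enumerate rows 0).map (fun q => (pvGet q.2 "parent_id" "", q))).foldl
        (fun d p => d.modify p.1 [] (fun g => g ++ [p.2])) PySem.Dict.empty) := by
    rw [List.foldl_map]
  rw [hfold, PySem.Dict.getD_foldl_modify_append, List.filter_map]
  simp [List.map_map, Function.comp_def]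

theorem pvGroups_keys_nodup (rows : List (List (String × String))) :
    (pvGroups rows).keys.Nodup := by
  unfold pvGroups
  exact PySem.Dict.nodup_keys_foldl_modify_key _ _ _ _ _ PySem.Dict.nodup_keys_empty

theorem pvGroups_items_snd (rows : List (List (String × String))) (pr : String × List (Int × List (String × String)))
    (h : pr ∈ (pvGroups rows).items) :
    pr.2 = (PySem.List.enumerate rows 0).filter (fun q => pvGet q.2 "parent_id" "" == pr.1) := by
  have hnd := pvGroups_keys_nodup rows
  have := PySem.Dict.getD_of_mem_items (d := pvGroups rows) (k := pr.1) (v := pr.2)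
    (by cases pr; exact h) hnd ([])
  rw [← this, pvGroups_getD]

theorem pvGroups_mem_items (rows : List (List (String × String))) (q : Int × List (String × String))
    (hq : q ∈ PySem.List.enumerate rows 0) :
    (pvGet q.2 "parent_id" "",
      (PySem.List.enumerate rows 0).filter
        (fun x => pvGet x.2 "parent_id" "" == pvGet q.2 "parent_id" "")) ∈ (pvGroups rows).items := by
  have hnd := pvGroups_keys_nodup rows
  have hkeys : (pvGroups rows).keys =
      PySem.Set.update ((PySem.Dict.empty : PySem.Dict String (List (Int × List (String × String)))).keys)
        ((PySem.List.enumerate rows 0).map (fun q => pvGet q.2 "parent_id" "")) := by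
    unfold pvGroups
    exact PySem.Dict.keys_foldl_modify_key _ _ _ _ _
  have hmemk : pvGet q.2 "parent_id" "" ∈ (pvGroups rows).keys := by
    rw [hkeys]
    have : PySem.Set.update ((PySem.Dict.empty : PySem.Dict String (List (Int × List (String × String)))).keys)
        ((PySem.List.enumerate rows 0).map (fun q => pvGet q.2 "parent_id" "")) =
        PySem.Set.ofList ((PySem.List.enumerate rows 0).map (fun q => pvGet q.2 "parent_id" "")) := by
      simp [PySem.Set.update, PySem.Set.ofList, PySem.Dict.keys_empty]
    rw [this]
    exact (PySem.Set.mem_ofList _ _).mpr (List.mem_map_of_mem hq)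
  rw [PySem.Dict.items_eq_map_keys _ hnd ([])]
  have := List.mem_map_of_mem (f := fun k => (k, (pvGroups rows).getD k [])) hmemk
  simpa [pvGroups_getD] using this

theorem normalize_sort_orders_eq (rows : List (List (String × String))) :
    normalize_sort_orders rows = normalize_sort_orders_alt rows := by
  show (PySem.List.enumerate rows 0).map
      (fun q => pvSetSort q.2 ((pvOuter (pvGroups rows).items PySem.Dict.empty).getD q.1 "")) =
    (PySem.List.enumerate rows 0).map
      (fun q => pvSetSort q.2
        (((PySem.List.sorted2 (PySem.List.enumerate rows 0) (fun q => pvSortVal q.2)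
            (fun q => pvGet q.2 "short_name" "")).foldl pvStep
          (PySem.Dict.empty, PySem.Dict.empty)).2.getD q.1 ""))
  apply List.map_congr_left
  intro q hq
  congr 1
  set dec := PySem.List.enumerate rows 0 with hdec
  set p := pvGet q.2 "parent_id" "" with hp
  set G := dec.filter (fun x => pvGet x.2 "parent_id" "" == p) with hG
  set L := PySem.List.sorted2 G (fun q => pvSortVal q.2) (fun q => pvGet q.2 "short_name" "") with hL
  -- q sits somewhere in L
  have hqG : q ∈ G := by
    rw [hG]
    exact List.mem_filter.mpr ⟨hq, beq_self_eq_true p⟩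
  have hqL : q ∈ L := (pv_mem_sorted2 G q).mpr hqG
  obtain ⟨j, hj, hqj⟩ := List.mem_iff_getElem.mp hqL
  -- A's value
  have hndG : (G.map (·.1)).Nodup := by
    rw [hG]
    exact (pv_tags_nodup rows).sublist (List.Sublist.map (fun (x : Int × List (String × String)) => x.1) (List.filter_sublist (l := dec) (p := fun x => pvGet x.2 "parent_id" "" == p)))
  have hA : (pvOuter (pvGroups rows).items PySem.Dict.empty).get? (L[j].1)
      = some (PySem.Int.toStr (1 + j)) := by
    apply pvOuter_get _ _ p G (pvGroups_mem_items rows q hq)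
    · intro pr hpr hpe
      rw [pvGroups_items_snd rows pr hpr, hpe]
    · intro pr hpr hpe x hx hmem
      rcases List.mem_map.mp hmem with ⟨y, hy, hxy⟩
      rw [pvGroups_items_snd rows pr hpr] at hy
      have hyx : y = x :=
        pv_tag_inj rows y x (List.mem_of_mem_filter hy) (by rw [hG] at hx; exact List.mem_of_mem_filter hx) hxy
      subst hyx
      have h1 : pvGet y.2 "parent_id" "" = pr.1 := eq_of_beq (List.mem_filter.mp hy).2
      have h2 : pvGet y.2 "parent_id" "" = p := by
        rw [hG] at hx
        exact eq_of_beq (List.mem_filter.mp hx).2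
      exact hpe (h1 ▸ h2)
    · exact hndG
  -- B's value
  have hndO : (((PySem.List.sorted2 dec (fun q => pvSortVal q.2)
      (fun q => pvGet q.2 "short_name" "")).map (·.1))).Nodup :=
    ((pv_map_sorted2_perm dec).nodup_iff).mpr (pv_tags_nodup rows)
  have hfilt : (PySem.List.sorted2 dec (fun q => pvSortVal q.2)
      (fun q => pvGet q.2 "short_name" "")).filter (fun x => pvGet x.2 "parent_id" "" == p) = L := by
    rw [pv_sorted2_eq, hL, pv_sorted2_eq, hG]
    have := pv_filter_sorted (fun x => pvGet x.2 "parent_id" "" == p) dec [] (List.Pairwise.nil)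
    simpa using this
  have hB : ((PySem.List.sorted2 dec (fun q => pvSortVal q.2)
      (fun q => pvGet q.2 "short_name" "")).foldl pvStep
        (PySem.Dict.empty, PySem.Dict.empty)).2.get? (L[j].1)
      = some (PySem.Int.toStr ((j : Int) + 1)) := by
    have hj' : j < ((PySem.List.sorted2 dec (fun q => pvSortVal q.2)
        (fun q => pvGet q.2 "short_name" "")).filter (fun x => pvGet x.2 "parent_id" "" == p)).length := by
      rw [hfilt]; exact hj
    have := pvB_ranks (PySem.List.sorted2 dec (fun q => pvSortVal q.2)
        (fun q => pvGet q.2 "short_name" "")) hndO p j hj'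
    simpa [hfilt] using this
  -- combine
  rw [hqj] at hA hB
  rw [PySem.Dict.getD_eq_get?_getD, PySem.Dict.getD_eq_get?_getD, hA, hB]
  simp only [Option.getD_some]
  congr 1
  ring

-- ===== VERDICT (by name: the statement is the Claim_ definition above) =====
theorem normalize_sort_orders_spec : Claim_equal_normalize_sort_orders := by
  intro rows _ _
  unfold Spec_normalize_sort_orders
  exact normalize_sort_orders_eq rows
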